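-- pv_equiv track=rewrite | github.com/AnchalNigam/Code-Time | removeSmall.py | removeSmallElem
-- ===== SOURCE A (Python) =====
-- def removeSmallElem(numArr):
--   numArr.sort()
--   idx = 0
--   while idx < len(numArr) - 1:
--     if abs(numArr[idx+1]-numArr[idx]) <= 1:
--       del numArr[idx]
--     else:
--       idx += 1
--   if len(numArr) == 1:
--     return 'YES'
--   else:
--     return 'NO'
-- ===== SOURCE B (Python) =====
-- def removeSmallElem(numArr):
--     s = sorted(numArr)
--     if not s:
--         return 'NO'
--     return 'YES' if all(b - a <= 1 for a, b in zip(s, s[1:])) else 'NO'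
-- ===== Notes on version B (the rewrite author's own statement) =====
-- stated objective: faster
-- what changed: Replaced the quadratic sort-then-repeated-deletion loop by a single pass over the sorted list checking that every adjacent gap is at most 1 (the list collapses to one survivor iff it is nonempty and has no gap > 1).
import Mathlib
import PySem

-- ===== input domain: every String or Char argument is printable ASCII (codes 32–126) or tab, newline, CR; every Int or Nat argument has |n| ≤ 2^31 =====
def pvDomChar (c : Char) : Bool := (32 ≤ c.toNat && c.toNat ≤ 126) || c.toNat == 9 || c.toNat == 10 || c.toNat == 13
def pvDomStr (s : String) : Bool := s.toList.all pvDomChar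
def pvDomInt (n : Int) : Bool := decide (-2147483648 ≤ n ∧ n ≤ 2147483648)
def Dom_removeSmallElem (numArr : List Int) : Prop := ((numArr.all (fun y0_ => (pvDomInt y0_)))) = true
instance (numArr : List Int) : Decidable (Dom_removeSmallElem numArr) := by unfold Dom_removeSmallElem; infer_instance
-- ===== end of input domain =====

-- B replaces A's quadratic delete-in-place loop by one adjacent-gap pass over the sorted list
-- (equivalence is about the RETURN value only: Python A sorts/mutates its argument in place, B does not).

-- ===== PORT A =====
-- the while loop: idx and the current list are the state; 'del numArr[idx]' is eraseIdx;
-- numArr[idx] reads are in range (idx < len-1), so getD is exact here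
def removeSmallLoop (l : List Int) (idx : Nat) : List Int :=
  if idx < l.length - 1 then
    if |l.getD (idx+1) 0 - l.getD idx 0| ≤ 1 then
      removeSmallLoop (l.eraseIdx idx) idx
    else
      removeSmallLoop l (idx+1)
  else l
termination_by l.length - idx
decreasing_by
  · simp only [List.length_eraseIdx]; split <;> omega
  · omega

def removeSmallElem (numArr : List Int) : String :=
  if (removeSmallLoop (PySem.List.sorted numArr (fun x => x) false) 0).length = 1
  then "YES" else "NO"

-- ===== PORT B =====
-- the post-sort part of Source B on the sorted list s
def removeSmallAlt (s : List Int) : String :=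
  if s = [] then "NO"
  else if (s.zip s.tail).all (fun p => p.2 - p.1 ≤ 1) then "YES" else "NO"

def removeSmallElem_alt (numArr : List Int) : String :=
  removeSmallAlt (PySem.List.sorted numArr (fun x => x) false)

-- ===== PRECONDITION & SPEC =====
def Spec_removeSmallElem (numArr : List Int) (out : String) : Prop := out = removeSmallElem_alt numArr
instance (numArr : List Int) (out : String) : Decidable (Spec_removeSmallElem numArr out) := by unfold Spec_removeSmallElem; infer_instance

-- ===== CLAIM (what is proved, stated in full; the proofs are below) =====
def Claim_equal_removeSmallElem : Prop := ∀ (numArr : List Int), Dom_removeSmallElem numArr → Spec_removeSmallElem numArr (removeSmallElem numArr)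

-- ===== LEMMAS AND PROOFS =====

-- what A's loop leaves behind, as a structural recursion
def collapse : List Int → List Int
  | [] => []
  | [a] => [a]
  | a :: b :: r => if |b - a| ≤ 1 then collapse (b :: r) else a :: collapse (b :: r)

lemma loop_eq (l : List Int) (idx : Nat) :
    removeSmallLoop l idx = l.take idx ++ collapse (l.drop idx) := by
  induction l, idx using removeSmallLoop.induct with
  | case1 l idx h hc ih =>
    rw [removeSmallLoop, if_pos h, if_pos hc, ih]
    have hi : idx < l.length := by omega
    have hi1 : idx + 1 < l.length := by omega
    have hd : l.drop idx = l[idx] :: l.drop (idx + 1) := List.drop_eq_getElem_cons hi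
    have hd1 : l.drop (idx + 1) = l[idx+1] :: l.drop (idx + 2) := List.drop_eq_getElem_cons hi1
    have hga : l.getD idx 0 = l[idx] := by
      simp [List.getD_eq_getElem?_getD, List.getElem?_eq_getElem hi]
    have hgb : l.getD (idx+1) 0 = l[idx+1] := by
      simp [List.getD_eq_getElem?_getD, List.getElem?_eq_getElem hi1]
    rw [List.eraseIdx_eq_take_drop_succ]
    have htk : ((l.take idx ++ l.drop (idx+1)).take idx) = l.take idx := by
      rw [List.take_append_of_le_length (by simp; omega), List.take_take]
      simp
    have hdr : ((l.take idx ++ l.drop (idx+1)).drop idx) = l.drop (idx+1) := by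
      rw [List.drop_append_of_le_length (by simp; omega)]
      simp
    have hcol : collapse (l.drop idx) = collapse (l.drop (idx+1)) := by
      rw [hd, hd1, collapse, if_pos (by rw [hga, hgb] at hc; exact hc), ← hd1]
    rw [htk, hdr, hcol]
  | case2 l idx h hc ih =>
    rw [removeSmallLoop, if_pos h, if_neg hc, ih]
    have hi : idx < l.length := by omega
    have hi1 : idx + 1 < l.length := by omega
    have hd : l.drop idx = l[idx] :: l.drop (idx + 1) := List.drop_eq_getElem_cons hi
    have hd1 : l.drop (idx + 1) = l[idx+1] :: l.drop (idx + 2) := List.drop_eq_getElem_cons hi1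
    have hga : l.getD idx 0 = l[idx] := by
      simp [List.getD_eq_getElem?_getD, List.getElem?_eq_getElem hi]
    have hgb : l.getD (idx+1) 0 = l[idx+1] := by
      simp [List.getD_eq_getElem?_getD, List.getElem?_eq_getElem hi1]
    have hcol : collapse (l.drop idx) = l[idx] :: collapse (l.drop (idx+1)) := by
      rw [hd, hd1, collapse, if_neg (by rw [hga, hgb] at hc; exact hc), ← hd1]
    have htake : l.take (idx+1) = l.take idx ++ [l[idx]] := by
      rw [List.take_add_one, List.getElem?_eq_getElem hi]; rfl
    rw [htake, hcol, List.append_assoc]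
    rfl
  | case3 l idx h =>
    rw [removeSmallLoop, if_neg h]
    have hlen : l.length - idx ≤ 1 := by omega
    have : (l.drop idx).length ≤ 1 := by simp; omega
    have hc : collapse (l.drop idx) = l.drop idx := by
      rcases hx : l.drop idx with _ | ⟨a, _ | ⟨b, r⟩⟩
      · rfl
      · rfl
      · rw [hx] at this; simp at this
    rw [hc, List.take_append_drop]

lemma collapse_ne_nil (s : List Int) (h : s ≠ []) : collapse s ≠ [] := by
  induction s using collapse.induct with
  | case1 => exact absurd rfl h
  | case2 a => simp [collapse]
  | case3 a b r hc ih => rw [collapse, if_pos hc]; exact ih (by simp)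
  | case4 a b r hc ih => rw [collapse, if_neg hc]; simp

lemma collapse_len_one (s : List Int) (pw : s.Pairwise (· ≤ ·)) :
    (collapse s).length = 1 ↔ (s ≠ [] ∧ (s.zip s.tail).all (fun p => p.2 - p.1 ≤ 1) = true) := by
  induction s using collapse.induct with
  | case1 => simp [collapse]
  | case2 a => simp [collapse]
  | case3 a b r hc ih =>
    have hab : a ≤ b := (List.pairwise_cons.mp pw).1 b (by simp)
    have pw' : (b :: r).Pairwise (· ≤ ·) := (List.pairwise_cons.mp pw).2
    have habs : |b - a| = b - a := abs_of_nonneg (by omega)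
    rw [collapse, if_pos hc, ih pw']
    rw [habs] at hc
    simp only [List.zip, List.tail, List.zipWith_cons_cons, List.all_cons,
      Bool.and_eq_true, decide_eq_true_eq]
    constructor
    · rintro ⟨-, ht⟩; exact ⟨by simp, hc, ht⟩
    · rintro ⟨-, -, ht⟩; exact ⟨by simp, ht⟩
  | case4 a b r hc ih =>
    have hab : a ≤ b := (List.pairwise_cons.mp pw).1 b (by simp)
    have habs : |b - a| = b - a := abs_of_nonneg (by omega)
    rw [collapse, if_neg hc]
    rw [habs] at hc
    have hne := collapse_ne_nil (b :: r) (by simp)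
    have hlen : (collapse (b :: r)).length ≠ 0 := by
      simpa [List.length_eq_zero_iff] using hne
    simp only [List.zip, List.tail, List.zipWith_cons_cons, List.all_cons,
      Bool.and_eq_true, decide_eq_true_eq, List.length_cons]
    constructor
    · intro hl; omega
    · rintro ⟨-, hba, -⟩; omega

-- ===== VERDICT (by name: the statement is the Claim_ definition above) =====
theorem removeSmallElem_spec : Claim_equal_removeSmallElem := by
  intro numArr _
  unfold Spec_removeSmallElem removeSmallElem removeSmallElem_alt
  set s := PySem.List.sorted numArr (fun x => x) false with hs
  have pw : s.Pairwise (· ≤ ·) := PySem.List.sorted_pairwise (xs := numArr) (key := fun x => x)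
  rw [loop_eq]
  simp only [List.take_zero, List.drop_zero, List.nil_append]
  unfold removeSmallAlt
  by_cases hnil : s = []
  · rw [if_pos hnil, if_neg]
    rw [collapse_len_one s pw]
    tauto
  · rw [if_neg hnil]
    by_cases hall : (s.zip s.tail).all (fun p => p.2 - p.1 ≤ 1) = true
    · rw [if_pos hall, if_pos]
      rw [collapse_len_one s pw]
      exact ⟨hnil, hall⟩
    · rw [if_neg hall, if_neg]
      rw [collapse_len_one s pw]
      tauto
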